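-- pv_equiv track=rewrite | github.com/lolo41-21/lista-python-2 | question 73.py | filtrar_numeros
-- ===== SOURCE A (Python) =====
-- def filtrar_numeros(lista, tipo):
--     if tipo == 'pares':
--         return [n for n in lista if n % 2 == 0]
--     elif tipo == 'impares':
--         return [n for n in lista if n % 2 != 0]
--     elif tipo == 'positivos':
--         return [n for n in lista if n > 0]
--     elif tipo == 'negativos':
--         return [n for n in lista if n < 0]
--     else:
--         return []
-- ===== SOURCE B (Python) =====
-- def filtrar_numeros(lista, tipo):
--     # One classification pass builds all four buckets, then the answer is selected.
--     pares, impares, positivos, negativos = [], [], [], []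
--     for n in lista:
--         if n % 2 == 0:
--             pares.append(n)
--         else:
--             impares.append(n)
--         if n > 0:
--             positivos.append(n)
--         elif n < 0:
--             negativos.append(n)
--     return {'pares': pares, 'impares': impares,
--             'positivos': positivos, 'negativos': negativos}.get(tipo, [])
-- ===== Notes on version B (the rewrite author's own statement) =====
-- stated objective: alternative
-- what changed: Instead of choosing one predicate and filtering, B classifies every element in a single pass into all four buckets (pares/impares/positivos/negativos) and then selects the requested bucket from a table, defaulting to [].
import Mathlib
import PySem

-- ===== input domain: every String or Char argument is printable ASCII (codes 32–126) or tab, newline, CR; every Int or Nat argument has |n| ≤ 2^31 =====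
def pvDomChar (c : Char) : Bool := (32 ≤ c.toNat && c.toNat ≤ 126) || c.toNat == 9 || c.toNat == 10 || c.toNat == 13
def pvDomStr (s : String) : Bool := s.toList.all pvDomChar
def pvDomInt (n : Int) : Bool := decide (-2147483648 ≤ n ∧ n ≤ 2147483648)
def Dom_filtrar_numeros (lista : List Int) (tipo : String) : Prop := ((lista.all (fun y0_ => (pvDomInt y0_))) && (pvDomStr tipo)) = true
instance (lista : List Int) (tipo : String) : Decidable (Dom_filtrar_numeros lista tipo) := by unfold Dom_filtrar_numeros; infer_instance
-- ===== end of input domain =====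

-- B classifies each element in one pass into all four buckets and selects the requested one (alternative decomposition, same cost).
-- ===== PORT A =====
def filtrar_numeros (lista : List Int) (tipo : String) : List Int :=
  if tipo == "pares" then lista.filter (fun n => PySem.Int.mod n 2 == 0)
  else if tipo == "impares" then lista.filter (fun n => PySem.Int.mod n 2 != 0)
  else if tipo == "positivos" then lista.filter (fun n => decide (n > 0))
  else if tipo == "negativos" then lista.filter (fun n => decide (n < 0))
  else []

-- ===== PORT B =====
-- the classification loop: one fold over lista appending each n to its buckets
def pvClassify (lista : List Int) : List Int × List Int × List Int × List Int :=
  lista.foldl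
    (fun st n =>
      let (p, i, pos, neg) := st
      let (p, i) := if PySem.Int.mod n 2 == 0 then (p ++ [n], i) else (p, i ++ [n])
      let (pos, neg) :=
        if n > 0 then (pos ++ [n], neg)
        else if n < 0 then (pos, neg ++ [n])
        else (pos, neg)
      (p, i, pos, neg))
    ([], [], [], [])

def filtrar_numeros_alt (lista : List Int) (tipo : String) : List Int :=
  let (p, i, pos, neg) := pvClassify lista
  (PySem.Dict.ofList
    [("pares", p), ("impares", i), ("positivos", pos), ("negativos", neg)]).getD tipo []

-- ===== PRECONDITION & SPEC =====
def Spec_filtrar_numeros (lista : List Int) (tipo : String) (out : List Int) : Prop := out = filtrar_numeros_alt lista tipo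
instance (lista : List Int) (tipo : String) (out : List Int) : Decidable (Spec_filtrar_numeros lista tipo out) := by unfold Spec_filtrar_numeros; infer_instance

-- ===== CLAIM =====
def Claim_equal_filtrar_numeros : Prop := ∀ (lista : List Int) (tipo : String), Dom_filtrar_numeros lista tipo → Spec_filtrar_numeros lista tipo (filtrar_numeros lista tipo)

-- ===== LEMMAS AND PROOFS =====
-- invariant of the classification fold: each bucket is its accumulator ++ the matching filter
theorem pvClassify_go (lista p i pos neg : List Int) :
    lista.foldl
      (fun st n =>
        let (p, i, pos, neg) := st
        let (p, i) := if PySem.Int.mod n 2 == 0 then (p ++ [n], i) else (p, i ++ [n])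
        let (pos, neg) :=
          if n > 0 then (pos ++ [n], neg)
          else if n < 0 then (pos, neg ++ [n])
          else (pos, neg)
        (p, i, pos, neg))
      (p, i, pos, neg)
    = (p ++ lista.filter (fun n => PySem.Int.mod n 2 == 0),
       i ++ lista.filter (fun n => PySem.Int.mod n 2 != 0),
       pos ++ lista.filter (fun n => decide (n > 0)),
       neg ++ lista.filter (fun n => decide (n < 0))) := by
  induction lista generalizing p i pos neg with
  | nil => simp
  | cons x xs ih =>
    simp only [List.foldl_cons, List.filter_cons, bne]
    cases he : (PySem.Int.mod x 2 == 0) <;>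
    by_cases hp : x > 0 <;>
    by_cases hn : x < 0 <;>
    first
      | omega
      | (simp only [he, Bool.not_true, Bool.not_false, hp, hn,
          decide_eq_true_eq, ih, List.append_assoc, List.singleton_append] <;>
         simp [hp, hn, bne])

theorem pvClassify_eq (lista : List Int) :
    pvClassify lista
    = (lista.filter (fun n => PySem.Int.mod n 2 == 0),
       lista.filter (fun n => PySem.Int.mod n 2 != 0),
       lista.filter (fun n => decide (n > 0)),
       lista.filter (fun n => decide (n < 0))) := by
  unfold pvClassify
  rw [pvClassify_go]
  simp

theorem pvDict_eq_mk (p i pos neg : List Int) :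
    PySem.Dict.ofList [("pares", p), ("impares", i), ("positivos", pos), ("negativos", neg)]
    = PySem.Dict.mk [("pares", p), ("impares", i), ("positivos", pos), ("negativos", neg)] := rfl

-- ===== VERDICT =====
theorem filtrar_numeros_spec : Claim_equal_filtrar_numeros := by
  intro lista tipo _
  unfold Spec_filtrar_numeros filtrar_numeros filtrar_numeros_alt
  rw [pvClassify_eq]
  simp only [pvDict_eq_mk, PySem.Dict.getD_eq_get?_getD, PySem.Dict.get?_mk_cons, beq_iff_eq]
  by_cases h1 : tipo = "pares"
  · simp [h1]
  · by_cases h2 : tipo = "impares"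
    · simp [h2]
    · by_cases h3 : tipo = "positivos"
      · simp [h3]
      · by_cases h4 : tipo = "negativos"
        · simp [h4]
        · simp [h1, h2, h3, h4, Ne.symm h1, Ne.symm h2, Ne.symm h3, Ne.symm h4, PySem.Dict.get?]
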